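-- pv_equiv track=rewrite | github.com/zzy1130/ultrasound-rl-navigation | core/mdp_analysis.py | find_attractors_in_subset
-- ===== SOURCE A (Python) =====
-- from typing import Dict, List, Set, Tuple, Optional
--
-- def find_scc_tarjan(graph: Dict[int, List[int]], nodes_subset: Set[int]) -> List[List[int]]:
--     """
--     Find strongly connected components using Tarjan's algorithm.
--     Only considers nodes in nodes_subset.
--
--     Returns:
--         List of SCCs (each is a list of node IDs)
--     """
--     index_counter = [0]
--     stack = []
--     lowlinks = {}
--     index = {}
--     on_stack = {}
--     sccs = []
--
--     def strongconnect(node):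
--         index[node] = index_counter[0]
--         lowlinks[node] = index_counter[0]
--         index_counter[0] += 1
--         stack.append(node)
--         on_stack[node] = True
--
--         for neighbor in graph.get(node, []):
--             if neighbor not in nodes_subset:
--                 continue
--             if neighbor not in index:
--                 strongconnect(neighbor)
--                 lowlinks[node] = min(lowlinks[node], lowlinks[neighbor])
--             elif on_stack.get(neighbor, False):
--                 lowlinks[node] = min(lowlinks[node], index[neighbor])
--
--         if lowlinks[node] == index[node]:
--             scc = []
--             while True:
--                 w = stack.pop()
--                 on_stack[w] = False
--                 scc.append(w)
--                 if w == node: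
--                     break
--             # Include all SCCs (even single nodes, they're attractors)
--             sccs.append(sorted(scc))
--
--     for node in nodes_subset:
--         if node not in index:
--             strongconnect(node)
--
--     return sccs
--
-- def find_attractors_in_subset(
--     graph: Dict[int, List[int]],
--     subset: List[int],
--     all_reachable: Set[int]
-- ) -> List[List[int]]:
--     """
--     Find attractor nodes in an unreachable subset.
--     An attractor is a node/SCC that has no outgoing edges to outside the SCC.
--
--     Returns:
--         List of attractors (each is a list of node IDs in the SCC)
--     """
--     subset_set = set(subset)
--
--     # Find SCCs in the subset
--     sccs = find_scc_tarjan(graph, subset_set)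
--
--     # Find attractors (SCCs with no outgoing edges to other nodes outside the SCC)
--     attractors = []
--     for scc in sccs:
--         scc_set = set(scc)
--         has_external_edge = False
--         for node in scc:
--             for neighbor in graph.get(node, []):
--                 if neighbor not in scc_set:
--                     has_external_edge = True
--                     break
--             if has_external_edge:
--                 break
--
--         if not has_external_edge:
--             # This SCC is an attractor (bottom SCC)
--             attractors.append(scc)
--
--     # If no true attractors found, take nodes with no outgoing edges
--     if not attractors:
--         for node in subset:
--             outgoing = [n for n in graph.get(node, []) if n in subset_set]
--             if not outgoing:
--                 attractors.append([node])
--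
--     # If still no attractors, just use all nodes
--     if not attractors:
--         attractors = [[n] for n in subset]
--
--     return attractors
-- ===== SOURCE B (Python) =====
-- def find_attractors_in_subset(graph, subset, all_reachable):
--     subset_set = set(subset)
--
--     # Tarjan's SCC algorithm, iteratively with an explicit frame stack
--     index = {}
--     lowlink = {}
--     on_stack = {}
--     vstack = []
--     counter = 0
--     sccs = []
--     for start in subset_set:
--         if start in index:
--             continue
--         index[start] = counter
--         lowlink[start] = counter
--         counter += 1
--         vstack.append(start)
--         on_stack[start] = True
--         frames = [(start, 0)]
--         while frames:
--             node, i = frames.pop()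
--             nbs = graph.get(node, [])
--             if i < len(nbs):
--                 nb = nbs[i]
--                 frames.append((node, i + 1))
--                 if nb in subset_set:
--                     if nb not in index:
--                         index[nb] = counter
--                         lowlink[nb] = counter
--                         counter += 1
--                         vstack.append(nb)
--                         on_stack[nb] = True
--                         frames.append((nb, 0))
--                     elif on_stack.get(nb, False):
--                         lowlink[node] = min(lowlink[node], index[nb])
--             else:
--                 if lowlink[node] == index[node]:
--                     scc = []
--                     while True:
--                         w = vstack.pop()
--                         on_stack[w] = False
--                         scc.append(w)
--                         if w == node:
--                             break
--                     sccs.append(sorted(scc))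
--                 if frames:
--                     p = frames[-1][0]
--                     lowlink[p] = min(lowlink[p], lowlink[node])
--
--     # keep the bottom SCCs (no edge leaving the SCC)
--     attractors = []
--     for scc in sccs:
--         scc_set = set(scc)
--         if all(nb in scc_set for n in scc for nb in graph.get(n, [])):
--             attractors.append(scc)
--     if not attractors:
--         attractors = [[n] for n in subset
--                       if not any(x in subset_set for x in graph.get(n, []))]
--     if not attractors:
--         attractors = [[n] for n in subset]
--     return attractors
-- ===== Notes on version B (the rewrite author's own statement) =====
-- stated objective: alternative
-- what changed: The recursive Tarjan strongconnect helper is replaced by an iterative Tarjan with an explicit work stack of (node, next-neighbour-position) frames (updating the parent's lowlink when a child frame finishes), and the attractor filter and both fallbacks become filter/comprehension one-liners instead of append loops; B therefore has no recursion-depth limit.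
import Mathlib
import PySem

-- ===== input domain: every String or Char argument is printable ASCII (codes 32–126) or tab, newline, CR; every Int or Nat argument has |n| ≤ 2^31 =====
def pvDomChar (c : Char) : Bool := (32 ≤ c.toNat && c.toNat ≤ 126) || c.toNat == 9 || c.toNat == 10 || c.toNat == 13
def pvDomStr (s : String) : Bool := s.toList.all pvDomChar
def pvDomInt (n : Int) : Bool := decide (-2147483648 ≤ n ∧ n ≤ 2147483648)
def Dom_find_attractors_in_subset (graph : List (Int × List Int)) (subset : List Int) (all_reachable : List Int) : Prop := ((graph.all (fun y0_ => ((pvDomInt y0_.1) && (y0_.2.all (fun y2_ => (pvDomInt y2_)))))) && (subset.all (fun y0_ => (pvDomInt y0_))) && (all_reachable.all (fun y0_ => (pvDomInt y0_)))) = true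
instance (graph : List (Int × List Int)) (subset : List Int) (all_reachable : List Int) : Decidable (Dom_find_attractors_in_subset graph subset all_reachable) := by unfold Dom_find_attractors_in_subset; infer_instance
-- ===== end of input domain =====

-- B replaces A's recursive Tarjan SCC helper by an explicit work-stack (iterative) Tarjan and
-- folds/comprehensions for the attractor filter and fallbacks: same return value, no recursion (objective: alternative).

-- ===== PORT A =====
-- shared Tarjan state (both Pythons use the same counter/stack/dicts/sccs variables); stacks hold the top at the head
structure TSt where
  counter : Int
  stack : List Int
  lowlinks : PySem.Dict Int Int
  index : PySem.Dict Int Int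
  onStack : PySem.Dict Int Bool
  sccs : List (List Int)
deriving Repr, DecidableEq

def tarInit : TSt := ⟨0, [], PySem.Dict.empty, PySem.Dict.empty, PySem.Dict.empty, []⟩

-- graph.get(node, []) (association list, first match)
def getAdj (graph : List (Int × List Int)) (n : Int) : List Int :=
  ((graph.find? (fun p => p.1 == n)).map Prod.snd).getD []

-- the shared entry block of strongconnect / first visit of a node
def stStart (node : Int) (s : TSt) : TSt :=
  { s with index := s.index.insert node s.counter
         , lowlinks := s.lowlinks.insert node s.counter
         , counter := s.counter + 1
         , stack := node :: s.stack
         , onStack := s.onStack.insert node true }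

-- the shared 'while True: w = stack.pop() …' loop (empty-stack case unreachable: node is always on the stack)
def popLoop (node : Int) : List Int → PySem.Dict Int Bool → List Int → List Int × PySem.Dict Int Bool × List Int
  | [], onS, acc => ([], onS, acc)
  | w :: st, onS, acc =>
      let onS := onS.insert w false
      let acc := acc ++ [w]
      if w = node then (st, onS, acc) else popLoop node st onS acc

-- the shared 'if lowlinks[node] == index[node]: … sccs.append(sorted(scc))' block
def rootCk (node : Int) (s : TSt) : TSt :=
  if s.lowlinks.getD node 0 = s.index.getD node 0 then
    match popLoop node s.stack s.onStack [] with
    | (st, onS, scc) => { s with stack := st, onStack := onS, sccs := s.sccs ++ [PySem.List.sorted scc (fun x => x)] }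
  else s

-- A's recursive strongconnect; the fuel bounds the recursion DEPTH (Python's recursion has no
-- explicit bound; the fuel passed below always suffices, see aGo_isSome)
mutual
def aGo (gr : List (Int × List Int)) (ss : List Int) : Nat → Int → TSt → Option TSt
  | 0, _, _ => none
  | f+1, node, s =>
    match aLoop gr ss f node (getAdj gr node) (stStart node s) with
    | none => none
    | some s2 => some (rootCk node s2)
termination_by f _ _ => (f, 0, 0)

def aLoop (gr : List (Int × List Int)) (ss : List Int) : Nat → Int → List Int → TSt → Option TSt
  | _, _, [], s => some s
  | f, node, nb :: rest, s =>
    if PySem.Set.contains ss nb = false then aLoop gr ss f node rest s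
    else if s.index.contains nb = false then
      match aGo gr ss f nb s with
      | none => none
      | some s1 =>
          aLoop gr ss f node rest
            { s1 with lowlinks := s1.lowlinks.insert node (min (s1.lowlinks.getD node 0) (s1.lowlinks.getD nb 0)) }
    else if s.onStack.getD nb false then
      aLoop gr ss f node rest
        { s with lowlinks := s.lowlinks.insert node (min (s.lowlinks.getD node 0) (s.index.getD nb 0)) }
    else aLoop gr ss f node rest s
termination_by f _ l _ => (f, 1, l.length)
end

def find_attractors_in_subset (graph : List (Int × List Int)) (subset : List Int) (all_reachable : List Int) : List (List Int) :=
  let ss := PySem.Set.ofList subset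
  let sF := List.foldl (fun s node =>
      if s.index.contains node = false then (aGo graph ss (subset.length + 1) node s).getD s else s) tarInit ss
  let attractors := List.foldl (fun acc scc =>
      let sccSet := PySem.Set.ofList scc
      let hasExternal := scc.any (fun node => (getAdj graph node).any (fun nb => !(PySem.Set.contains sccSet nb)))
      if hasExternal then acc else acc ++ [scc]) [] sF.sccs
  let attractors := if attractors = [] then
      List.foldl (fun acc node =>
        let outgoing := (getAdj graph node).filter (fun x => PySem.Set.contains ss x)
        if outgoing = [] then acc ++ [[node]] else acc) [] subset
    else attractors
  if attractors = [] then subset.map (fun n => [n]) else attractors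

-- ===== PORT B =====
-- 'if frames: p = frames[-1][0]; lowlink[p] = min(lowlink[p], lowlink[node])' after finishing node
def pFix (rest : List (Int × Nat)) (node : Int) (s : TSt) : TSt :=
  match rest with
  | (p, _) :: _ => { s with lowlinks := s.lowlinks.insert p (min (s.lowlinks.getD p 0) (s.lowlinks.getD node 0)) }
  | [] => s

def totE (gr : List (Int × List Int)) : Nat := (gr.map (fun p => p.2.length)).sum

-- lemmas cited by bRun's termination argument
lemma getAdj_length_le_totE (gr : List (Int × List Int)) (n : Int) : (getAdj gr n).length ≤ totE gr := by
  unfold getAdj totE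
  cases h : gr.find? (fun p => p.1 == n) with
  | none => simp
  | some p =>
      have hm : p ∈ gr := List.mem_of_find?_eq_some h
      simp only [Option.map_some, Option.getD_some]
      calc p.2.length ≤ ((gr.map (fun p => p.2.length)).sum) := by
            exact List.le_sum_of_mem (by exact List.mem_map_of_mem hm)
      _ = _ := rfl

def uvD (ss : List Int) (d : PySem.Dict Int Int) : Nat := (ss.filter (fun x => !(d.contains x))).length

lemma uvD_insert_le (ss : List Int) (d : PySem.Dict Int Int) (n : Int) (v : Int) :
    uvD ss (d.insert n v) ≤ uvD ss d := by
  unfold uvD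
  refine List.Sublist.length_le (List.monotone_filter_right _ ?_)
  intro x hx
  simp only [PySem.Dict.contains_insert, Bool.not_eq_true', Bool.or_eq_false_iff] at hx ⊢
  exact hx.2

lemma uvD_insert_lt (ss : List Int) (d : PySem.Dict Int Int) (n : Int) (v : Int)
    (hmem : n ∈ ss) (hnc : d.contains n = false) :
    uvD ss (d.insert n v) + 1 ≤ uvD ss d := by
  induction ss with
  | nil => simp at hmem
  | cons x t ih =>
      unfold uvD
      by_cases hx : x = n
      · subst hx
        have h1 : (PySem.Dict.contains (d.insert x v) x) = true := by
          simp [PySem.Dict.contains_insert d x x v]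
        have hle := uvD_insert_le t d x v
        unfold uvD at hle
        simp only [List.filter_cons, h1, Bool.not_true, hnc, Bool.not_false]
        simp only [Bool.false_eq_true, if_false, if_pos trivial, List.length_cons]
        omega
      · rcases List.mem_cons.mp hmem with h | h
        · exact absurd h.symm hx
        · have hc : (d.insert n v).contains x = d.contains x := by
            simp [PySem.Dict.contains_insert, show (x == n) = false by simp [hx]]
          have iht := ih h
          unfold uvD at iht
          simp only [List.filter_cons, hc]
          cases hdx : !(d.contains x) <;> simp only [if_true, if_false, Bool.false_eq_true, List.length_cons] at iht ⊢ <;> omega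

@[simp] lemma rootCk_index (node : Int) (s : TSt) : (rootCk node s).index = s.index := by
  unfold rootCk
  split
  · split; rfl
  · rfl

@[simp] lemma pFix_index (rest : List (Int × Nat)) (node : Int) (s : TSt) :
    (pFix rest node s).index = s.index := by
  unfold pFix; split <;> rfl

def bMeasure (gr : List (Int × List Int)) (ss : List Int) (frames : List (Int × Nat)) (s : TSt) : Nat :=
  (frames.map (fun fr => (getAdj gr fr.1).length - fr.2 + 1)).sum + (totE gr + 1) * uvD ss s.index

-- B's while-loop over the explicit work stack of (node, next-neighbour-position) frames
def bRun (gr : List (Int × List Int)) (ss : List Int) (frames : List (Int × Nat)) (s : TSt) : TSt :=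
  match frames with
  | [] => s
  | (node, i) :: rest =>
    match h : (getAdj gr node)[i]? with
    | some nb =>
      if hss : PySem.Set.contains ss nb then
        if hidx : s.index.contains nb = false then
          bRun gr ss ((nb, 0) :: (node, i+1) :: rest) (stStart nb s)
        else if s.onStack.getD nb false then
          bRun gr ss ((node, i+1) :: rest)
            { s with lowlinks := s.lowlinks.insert node (min (s.lowlinks.getD node 0) (s.index.getD nb 0)) }
        else bRun gr ss ((node, i+1) :: rest) s
      else bRun gr ss ((node, i+1) :: rest) s
    | none => bRun gr ss rest (pFix rest node (rootCk node s))
termination_by bMeasure gr ss frames s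
decreasing_by
  · -- first visit of nb: one node leaves the unvisited set
    have hi : i < (getAdj gr node).length := List.getElem?_eq_some_iff.mp h |>.1
    have hmem : nb ∈ ss := (PySem.Set.contains_iff ss nb).mp hss
    have hlt := uvD_insert_lt ss s.index nb s.counter hmem hidx
    have hdeg := getAdj_length_le_totE gr nb
    simp only [bMeasure, stStart, List.map_cons, List.sum_cons]
    have hmul := Nat.mul_le_mul_left (totE gr + 1) hlt
    rw [Nat.mul_succ] at hmul
    omega
  · have hi : i < (getAdj gr node).length := List.getElem?_eq_some_iff.mp h |>.1
    simp only [bMeasure, List.map_cons, List.sum_cons]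
    omega
  · have hi : i < (getAdj gr node).length := List.getElem?_eq_some_iff.mp h |>.1
    simp only [bMeasure, List.map_cons, List.sum_cons]
    omega
  · have hi : i < (getAdj gr node).length := List.getElem?_eq_some_iff.mp h |>.1
    simp only [bMeasure, List.map_cons, List.sum_cons]
    omega
  · -- node finished: its frame is removed, the index dict is unchanged
    simp only [bMeasure, List.map_cons, List.sum_cons, pFix_index, rootCk_index]
    omega

def find_attractors_in_subset_alt (graph : List (Int × List Int)) (subset : List Int) (all_reachable : List Int) : List (List Int) :=
  let ss := PySem.Set.ofList subset
  let sF := List.foldl (fun s start =>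
      if s.index.contains start then s
      else bRun graph ss [(start, 0)] (stStart start s)) tarInit ss
  let attractors := sF.sccs.filter (fun scc =>
      let sccSet := PySem.Set.ofList scc
      scc.all (fun node => (getAdj graph node).all (fun nb => PySem.Set.contains sccSet nb)))
  let attractors := if attractors = [] then
      (subset.filter (fun n => !((getAdj graph n).any (fun x => PySem.Set.contains ss x)))).map (fun n => [n])
    else attractors
  if attractors = [] then subset.map (fun n => [n]) else attractors

-- ===== PRECONDITION & SPEC =====
def Spec_find_attractors_in_subset (graph : List (Int × List Int)) (subset : List Int) (all_reachable : List Int) (out : List (List Int)) : Prop := out = find_attractors_in_subset_alt graph subset all_reachable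
instance (graph : List (Int × List Int)) (subset : List Int) (all_reachable : List Int) (out : List (List Int)) : Decidable (Spec_find_attractors_in_subset graph subset all_reachable out) := by unfold Spec_find_attractors_in_subset; infer_instance

-- ===== CLAIM (what is proved, stated in full; the proofs are below) =====
def Claim_equal_find_attractors_in_subset : Prop := ∀ (graph : List (Int × List Int)) (subset : List Int) (all_reachable : List Int), Dom_find_attractors_in_subset graph subset all_reachable → Spec_find_attractors_in_subset graph subset all_reachable (find_attractors_in_subset graph subset all_reachable)

-- ===== LEMMAS AND PROOFS =====

-- step equations of B's while-loop
lemma bRun_nil (gr : List (Int × List Int)) (ss : List Int) (s : TSt) : bRun gr ss [] s = s := by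
  rw [bRun]

lemma bRun_fin (gr : List (Int × List Int)) (ss : List Int) (node : Int) (i : Nat) (rest : List (Int × Nat)) (s : TSt)
    (h : (getAdj gr node)[i]? = none) :
    bRun gr ss ((node, i) :: rest) s = bRun gr ss rest (pFix rest node (rootCk node s)) := by
  rw [bRun]; split
  · simp_all
  · rfl

lemma bRun_start (gr : List (Int × List Int)) (ss : List Int) (node : Int) (i : Nat) (rest : List (Int × Nat)) (s : TSt) (nb : Int)
    (h : (getAdj gr node)[i]? = some nb) (hss : PySem.Set.contains ss nb = true) (hidx : s.index.contains nb = false) :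
    bRun gr ss ((node, i) :: rest) s = bRun gr ss ((nb, 0) :: (node, i+1) :: rest) (stStart nb s) := by
  rw [bRun]; split
  · rename_i nb' h'
    rw [h] at h'; injection h' with h'; subst h'
    rw [dif_pos hss, dif_pos hidx]
  · simp_all

lemma bRun_low (gr : List (Int × List Int)) (ss : List Int) (node : Int) (i : Nat) (rest : List (Int × Nat)) (s : TSt) (nb : Int)
    (h : (getAdj gr node)[i]? = some nb) (hss : PySem.Set.contains ss nb = true) (hidx : s.index.contains nb = true)
    (hon : s.onStack.getD nb false = true) :
    bRun gr ss ((node, i) :: rest) s =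
      bRun gr ss ((node, i+1) :: rest)
        { s with lowlinks := s.lowlinks.insert node (min (s.lowlinks.getD node 0) (s.index.getD nb 0)) } := by
  rw [bRun]; split
  · rename_i nb' h'
    rw [h] at h'; injection h' with h'; subst h'
    rw [dif_pos hss, dif_neg (by simp [hidx]), if_pos hon]
  · simp_all

lemma bRun_skip_vis (gr : List (Int × List Int)) (ss : List Int) (node : Int) (i : Nat) (rest : List (Int × Nat)) (s : TSt) (nb : Int)
    (h : (getAdj gr node)[i]? = some nb) (hss : PySem.Set.contains ss nb = true) (hidx : s.index.contains nb = true)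
    (hon : s.onStack.getD nb false = false) :
    bRun gr ss ((node, i) :: rest) s = bRun gr ss ((node, i+1) :: rest) s := by
  rw [bRun]; split
  · rename_i nb' h'
    rw [h] at h'; injection h' with h'; subst h'
    rw [dif_pos hss, dif_neg (by simp [hidx]), if_neg (by simp [hon])]
  · simp_all

lemma bRun_skip_out (gr : List (Int × List Int)) (ss : List Int) (node : Int) (i : Nat) (rest : List (Int × Nat)) (s : TSt) (nb : Int)
    (h : (getAdj gr node)[i]? = some nb) (hss : PySem.Set.contains ss nb = false) :
    bRun gr ss ((node, i) :: rest) s = bRun gr ss ((node, i+1) :: rest) s := by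
  rw [bRun]; split
  · rename_i nb' h'
    rw [h] at h'; injection h' with h'; subst h'
    rw [dif_neg (by rw [hss]; simp)]
  · simp_all

-- SIMULATION: a completing run of A's recursive strongconnect body equals B's machine run
lemma sim_loop (gr : List (Int × List Int)) (ss : List Int) (f : Nat)
    (hGo : ∀ n s s', aGo gr ss f n s = some s' →
      ∀ rest, bRun gr ss ((n, 0) :: rest) (stStart n s) = bRun gr ss rest (pFix rest n s')) :
    ∀ l n i s s₂, (getAdj gr n).drop i = l → aLoop gr ss f n l s = some s₂ →
      ∀ rest, bRun gr ss ((n, i) :: rest) s = bRun gr ss rest (pFix rest n (rootCk n s₂)) := by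
  intro l
  induction l with
  | nil =>
      intro n i s s₂ hdrop hA rest
      have hnone : (getAdj gr n)[i]? = none :=
        List.getElem?_eq_none (List.drop_eq_nil_iff.mp hdrop)
      rw [bRun_fin gr ss n i rest s hnone]
      rw [aLoop] at hA
      injection hA with hA
      rw [hA]
  | cons nb t ih =>
      intro n i s s₂ hdrop hA rest
      have hsome : (getAdj gr n)[i]? = some nb := by
        have h0 := @List.getElem?_drop _ (getAdj gr n) i 0
        rw [hdrop] at h0
        simpa using h0.symm
      have hdrop' : (getAdj gr n).drop (i+1) = t := by
        have h1 : List.drop 1 ((getAdj gr n).drop i) = (getAdj gr n).drop (i+1) := by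
          rw [List.drop_drop]
        rw [hdrop] at h1
        have h2 : t = List.drop (i + 1) (getAdj gr n) := by simpa using h1
        exact h2.symm
      rw [aLoop] at hA
      cases hss : PySem.Set.contains ss nb with
      | false =>
          rw [if_pos hss] at hA
          rw [bRun_skip_out gr ss n i rest s nb hsome hss]
          exact ih n (i+1) s s₂ hdrop' hA rest
      | true =>
          rw [if_neg (by rw [hss]; simp)] at hA
          cases hidx : s.index.contains nb with
          | false =>
              rw [if_pos hidx] at hA
              cases hgo : aGo gr ss f nb s with
              | none => rw [hgo] at hA; cases hA
              | some s1 =>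
                  rw [hgo] at hA
                  simp only [] at hA
                  rw [bRun_start gr ss n i rest s nb hsome hss hidx]
                  rw [hGo nb s s1 hgo ((n, i+1) :: rest)]
                  exact ih n (i+1) _ s₂ hdrop' hA rest
          | true =>
              rw [if_neg (by rw [hidx]; simp)] at hA
              cases hon : s.onStack.getD nb false with
              | true =>
                  rw [if_pos hon] at hA
                  rw [bRun_low gr ss n i rest s nb hsome hss hidx hon]
                  exact ih n (i+1) _ s₂ hdrop' hA rest
              | false =>
                  rw [if_neg (by rw [hon]; simp)] at hA
                  rw [bRun_skip_vis gr ss n i rest s nb hsome hss hidx hon]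
                  exact ih n (i+1) s s₂ hdrop' hA rest

lemma sim_go (gr : List (Int × List Int)) (ss : List Int) :
    ∀ f n s s', aGo gr ss f n s = some s' →
      ∀ rest, bRun gr ss ((n, 0) :: rest) (stStart n s) = bRun gr ss rest (pFix rest n s') := by
  intro f
  induction f with
  | zero => intro n s s' h; rw [aGo] at h; cases h
  | succ f ih =>
      intro n s s' h rest
      rw [aGo] at h
      cases hl : aLoop gr ss f n (getAdj gr n) (stStart n s) with
      | none => rw [hl] at h; cases h
      | some s2 =>
          rw [hl] at h
          simp only [] at h
          injection h with h
          rw [← h]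
          exact sim_loop gr ss f ih (getAdj gr n) n 0 (stStart n s) s2 (by simp) hl rest

-- FUEL SUFFICIENCY: aGo never runs out of fuel when the fuel exceeds the number of unvisited nodes
lemma uv_pos (ss : List Int) (d : PySem.Dict Int Int) (n : Int) (hmem : n ∈ ss) (hnc : d.contains n = false) :
    0 < uvD ss d := by
  unfold uvD
  exact List.length_pos_of_mem (List.mem_filter.mpr ⟨hmem, by simp [hnc]⟩)

lemma loop_ok (gr : List (Int × List Int)) (ss : List Int) (f : Nat)
    (hGo : ∀ n s, n ∈ ss → s.index.contains n = false → uvD ss s.index ≤ f →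
      ∃ s', aGo gr ss f n s = some s' ∧ uvD ss s'.index + 1 ≤ uvD ss s.index) :
    ∀ l n s, uvD ss s.index ≤ f →
      ∃ s₂, aLoop gr ss f n l s = some s₂ ∧ uvD ss s₂.index ≤ uvD ss s.index := by
  intro l
  induction l with
  | nil => intro n s _; exact ⟨s, by rw [aLoop], le_refl _⟩
  | cons nb t ih =>
      intro n s hf
      rw [aLoop]
      cases hss : PySem.Set.contains ss nb with
      | false =>
          rw [if_pos rfl]
          exact ih n s hf
      | true =>
          rw [if_neg (by simp)]
          cases hidx : s.index.contains nb with
          | false =>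
              rw [if_pos rfl]
              obtain ⟨s1, hgo, hlt⟩ := hGo nb s ((PySem.Set.contains_iff ss nb).mp hss) hidx hf
              rw [hgo]
              obtain ⟨s₂, hl, hle⟩ := ih n
                { s1 with lowlinks := s1.lowlinks.insert n (min (s1.lowlinks.getD n 0) (s1.lowlinks.getD nb 0)) }
                (by simpa using Nat.le_trans (by omega) hf)
              exact ⟨s₂, hl, by simp at hle; omega⟩
          | true =>
              rw [if_neg (by simp)]
              cases hon : s.onStack.getD nb false with
              | true =>
                  rw [if_pos rfl]
                  obtain ⟨s₂, hl, hle⟩ := ih n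
                    { s with lowlinks := s.lowlinks.insert n (min (s.lowlinks.getD n 0) (s.index.getD nb 0)) }
                    (by simpa using hf)
                  exact ⟨s₂, hl, by simpa using hle⟩
              | false =>
                  rw [if_neg (by simp)]
                  exact ih n s hf

lemma go_ok (gr : List (Int × List Int)) (ss : List Int) :
    ∀ f n s, n ∈ ss → s.index.contains n = false → uvD ss s.index ≤ f →
      ∃ s', aGo gr ss f n s = some s' ∧ uvD ss s'.index + 1 ≤ uvD ss s.index := by
  intro f
  induction f with
  | zero =>
      intro n s hmem hnc hf
      exact absurd hf (by have := uv_pos ss s.index n hmem hnc; omega)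
  | succ f ih =>
      intro n s hmem hnc hf
      have hstart : uvD ss (stStart n s).index + 1 ≤ uvD ss s.index := by
        simpa [stStart] using uvD_insert_lt ss s.index n s.counter hmem hnc
      obtain ⟨s₂, hl, hle⟩ := loop_ok gr ss f ih (getAdj gr n) n (stStart n s) (by omega)
      refine ⟨rootCk n s₂, ?_, ?_⟩
      · rw [aGo, hl]
      · have : uvD ss (rootCk n s₂).index = uvD ss s₂.index := by rw [rootCk_index]
        omega

-- the attractor filter: A's append-fold equals B's filter
lemma attr_eq (graph : List (Int × List Int)) (sccs : List (List Int)) :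
    List.foldl (fun acc scc =>
      if scc.any (fun node => (getAdj graph node).any (fun nb => !(PySem.Set.contains (PySem.Set.ofList scc) nb))) then acc
      else acc ++ [scc]) [] sccs
    = sccs.filter (fun scc => scc.all (fun node => (getAdj graph node).all (fun nb => PySem.Set.contains (PySem.Set.ofList scc) nb))) := by
  have hstep : List.foldl (fun acc scc =>
      if scc.any (fun node => (getAdj graph node).any (fun nb => !(PySem.Set.contains (PySem.Set.ofList scc) nb))) then acc
      else acc ++ [scc]) [] sccs
    = List.foldl (fun acc scc =>
      if (scc.all (fun node => (getAdj graph node).all (fun nb => PySem.Set.contains (PySem.Set.ofList scc) nb))) = true then acc ++ [scc]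
      else acc) [] sccs := by
    apply PySem.List.foldl_congr_mem
    intro acc scc _
    have hba : (scc.any (fun node => (getAdj graph node).any (fun nb => !(PySem.Set.contains (PySem.Set.ofList scc) nb))))
        = !(scc.all (fun node => (getAdj graph node).all (fun nb => PySem.Set.contains (PySem.Set.ofList scc) nb))) := by
      simp [List.all_eq_not_any_not]
    rw [hba]
    cases hall : scc.all (fun node => (getAdj graph node).all (fun nb => PySem.Set.contains (PySem.Set.ofList scc) nb)) <;> simp
  rw [hstep, PySem.List.foldl_append_if _ (fun scc => scc) sccs []]
  simp

-- the first fallback: A's append-fold over subset equals B's filter+map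
lemma fallback_eq (graph : List (Int × List Int)) (ss : List Int) (subset : List Int) :
    List.foldl (fun acc node =>
      if (getAdj graph node).filter (fun x => PySem.Set.contains ss x) = [] then acc ++ [[node]] else acc) [] subset
    = (subset.filter (fun n => !((getAdj graph n).any (fun x => PySem.Set.contains ss x)))).map (fun n => [n]) := by
  have hstep : List.foldl (fun acc node =>
      if (getAdj graph node).filter (fun x => PySem.Set.contains ss x) = [] then acc ++ [[node]] else acc) [] subset
    = List.foldl (fun acc node =>
      if (!((getAdj graph node).any (fun x => PySem.Set.contains ss x))) = true then acc ++ [[node]] else acc) [] subset := by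
    apply PySem.List.foldl_congr_mem
    intro acc node _
    by_cases hf : (getAdj graph node).filter (fun x => PySem.Set.contains ss x) = []
    · rw [if_pos hf, if_pos]
      simp only [Bool.not_eq_true', ← Bool.not_eq_true]
      intro hany
      obtain ⟨x, hx, hc⟩ := List.any_eq_true.mp hany
      have : x ∈ (getAdj graph node).filter (fun x => PySem.Set.contains ss x) := List.mem_filter.mpr ⟨hx, hc⟩
      rw [hf] at this; cases this
    · rw [if_neg hf, if_neg]
      intro hno
      apply hf
      apply List.filter_eq_nil_iff.mpr
      intro x hx hc
      have hany : (getAdj graph node).any (fun x => PySem.Set.contains ss x) = false := by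
        simpa using hno
      have htr := List.any_eq_true.mpr ⟨x, hx, hc⟩
      rw [hany] at htr; cases htr
  rw [hstep, PySem.List.foldl_append_if _ (fun node => [node]) subset []]
  simp

-- ===== VERDICT (by name: the statement is the Claim_ definition above) =====
theorem find_attractors_in_subset_spec : Claim_equal_find_attractors_in_subset := by
  unfold Claim_equal_find_attractors_in_subset
  intro graph subset all_reachable _
  unfold Spec_find_attractors_in_subset
  unfold find_attractors_in_subset find_attractors_in_subset_alt
  simp only []
  have hfold : List.foldl (fun s node =>
      if s.index.contains node = false then (aGo graph (PySem.Set.ofList subset) (subset.length + 1) node s).getD s else s)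
      tarInit (PySem.Set.ofList subset)
    = List.foldl (fun s start =>
      if s.index.contains start then s
      else bRun graph (PySem.Set.ofList subset) [(start, 0)] (stStart start s)) tarInit (PySem.Set.ofList subset) := by
    apply PySem.List.foldl_congr_mem
    intro s node hmem
    cases hc : s.index.contains node with
    | false =>
        rw [if_pos rfl, if_neg (by simp)]
        have hCnt : uvD (PySem.Set.ofList subset) s.index ≤ subset.length + 1 := by
          have h1 := List.length_filter_le (fun x => !(s.index.contains x)) (PySem.Set.ofList subset)
          have h2 := PySem.Set.length_ofList_le subset
          unfold uvD
          omega
        obtain ⟨s', hgo, _⟩ := go_ok graph (PySem.Set.ofList subset) (subset.length + 1) node s hmem hc hCnt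
        have hb := sim_go graph (PySem.Set.ofList subset) (subset.length + 1) node s s' hgo []
        rw [bRun_nil] at hb
        rw [hgo, hb]
        rfl
    | true =>
        rw [if_neg (by simp), if_pos rfl]
  rw [hfold, attr_eq, fallback_eq]
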